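-- pv_equiv track=rewrite | github.com/wssun/TranCS | process_dataset/generate_from_jsonl.py | get_start_end_idx
-- ===== SOURCE A (Python) =====
-- def get_start_end_idx(lines):
--     list_ = []
--     start_idx = 0
--     for idx, line in enumerate(lines):
--         if line.startswith('filename: ') and idx != 0:
--             end_idx = idx
--             list_.append([start_idx, end_idx])
--             start_idx = idx
--     list_.append([start_idx, len(lines)])
--
--     return list_
-- ===== SOURCE B (Python) =====
-- def get_start_end_idx(lines):
--     bounds = [0] + [i for i, l in enumerate(lines)
--                     if i != 0 and l.startswith('filename: ')] + [len(lines)]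
--     return [[a, b] for a, b in zip(bounds, bounds[1:])]
-- ===== Notes on version B (the rewrite author's own statement) =====
-- stated objective: alternative
-- what changed: Replaces the running start_idx accumulation with a two-phase decomposition: first collect all boundary indices (0, each non-initial 'filename: ' marker, len(lines)), then pair adjacent boundaries with zip.
import Mathlib
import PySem

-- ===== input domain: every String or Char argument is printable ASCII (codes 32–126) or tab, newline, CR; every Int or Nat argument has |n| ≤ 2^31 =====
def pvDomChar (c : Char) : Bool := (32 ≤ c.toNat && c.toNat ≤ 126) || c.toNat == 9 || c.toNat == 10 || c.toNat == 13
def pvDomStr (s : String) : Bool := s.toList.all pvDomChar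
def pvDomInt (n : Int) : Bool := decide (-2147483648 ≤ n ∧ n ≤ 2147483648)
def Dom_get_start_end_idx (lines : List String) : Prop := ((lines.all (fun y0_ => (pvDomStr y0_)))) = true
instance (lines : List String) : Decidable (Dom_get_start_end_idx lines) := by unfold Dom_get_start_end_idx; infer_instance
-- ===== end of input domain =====

-- B replaces A's running start_idx accumulation with a two-phase decomposition
-- (collect boundary indices, then pair adjacent ones); same cost, alternative structure.

-- ===== PORT A =====
def get_start_end_idx (lines : List String) : List (List Int) :=
  let st := (PySem.List.enumerate lines).foldl
    (fun (st : List (List Int) × Int) p =>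
      if PySem.Str.startswith p.2 "filename: " && p.1 != 0 then
        (st.1 ++ [[st.2, p.1]], p.1)
      else st) ([], 0)
  st.1 ++ [[st.2, (lines.length : Int)]]

-- ===== PORT B =====
def get_start_end_idx_alt (lines : List String) : List (List Int) :=
  let bounds : List Int :=
    [0] ++ (((PySem.List.enumerate lines).filter
      (fun p => p.1 != 0 && PySem.Str.startswith p.2 "filename: ")).map (·.1))
        ++ [(lines.length : Int)]
  (bounds.zip bounds.tail).map (fun p => [p.1, p.2])

-- ===== PRECONDITION & SPEC =====
def Spec_get_start_end_idx (lines : List String) (out : List (List Int)) : Prop := out = get_start_end_idx_alt lines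
instance (lines : List String) (out : List (List Int)) : Decidable (Spec_get_start_end_idx lines out) := by unfold Spec_get_start_end_idx; infer_instance

-- ===== CLAIM (what is proved, stated in full; the proofs are below) =====
def Claim_equal_get_start_end_idx : Prop := ∀ (lines : List String), Dom_get_start_end_idx lines → Spec_get_start_end_idx lines (get_start_end_idx lines)

-- ===== LEMMAS AND PROOFS =====

/-- Adjacent-pair builder used only in the proofs. -/
def adjP : Int → List Int → List (List Int)
  | _, [] => []
  | s, b :: bs => [s, b] :: adjP b bs

def pvCond (p : Int × String) : Bool := p.1 != 0 && PySem.Str.startswith p.2 "filename: "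

theorem foldA_eq (items : List (Int × String)) :
    ∀ (acc : List (List Int)) (s : Int),
    items.foldl
      (fun (st : List (List Int) × Int) p =>
        if PySem.Str.startswith p.2 "filename: " && p.1 != 0 then
          (st.1 ++ [[st.2, p.1]], p.1)
        else st) (acc, s)
      = (acc ++ adjP s ((items.filter pvCond).map (·.1)),
         ((items.filter pvCond).map (·.1)).getLastD s) := by
  induction items with
  | nil => intro acc s; simp [adjP]
  | cons p rest ih =>
    intro acc s
    rw [List.foldl_cons,
        show (PySem.Str.startswith p.2 "filename: " && p.1 != 0) = pvCond p from Bool.and_comm _ _]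
    cases hp : pvCond p with
    | false =>
      rw [List.filter_cons_of_neg (by simp [hp]), if_neg Bool.false_ne_true, ih]
    | true =>
      rw [List.filter_cons_of_pos (by simp [hp]),
          show (if (true = true) then ((acc, s).1 ++ [[(acc, s).2, p.1]], p.1) else (acc, s))
             = (acc ++ [[s, p.1]], p.1) from rfl, ih]
      simp only [List.map_cons, adjP, List.getLastD_cons, List.append_assoc, List.singleton_append,
        List.cons_append, List.nil_append]

theorem zip_adj (bs : List Int) : ∀ s : Int,
    (((s :: bs).zip bs).map (fun p => [p.1, p.2])) = adjP s bs := by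
  induction bs with
  | nil => intro s; simp [adjP]
  | cons b bs ih => intro s; simp [adjP, ih]

theorem adjP_append_last (ms : List Int) : ∀ (s n : Int),
    adjP s (ms ++ [n]) = adjP s ms ++ [[ms.getLastD s, n]] := by
  induction ms with
  | nil => intro s n; simp [adjP]
  | cons m ms ih =>
    intro s n
    simp only [List.cons_append, adjP, ih, List.getLastD_cons]

-- ===== VERDICT (by name: the statement is the Claim_ definition above) =====
theorem get_start_end_idx_spec : Claim_equal_get_start_end_idx := by
  intro lines _
  unfold Spec_get_start_end_idx get_start_end_idx get_start_end_idx_alt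
  have hc : (fun p : Int × String => p.1 != 0 && PySem.Str.startswith p.2 "filename: ") = pvCond := rfl
  simp only [hc, foldA_eq, List.singleton_append, List.nil_append, List.cons_append,
    List.tail_cons]
  rw [zip_adj, adjP_append_last]
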